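-- pv_equiv track=rewrite | github.com/bensteele10/wildfires | analysis.py | getLifetimes
-- ===== SOURCE A (Python) =====
-- def checkAcross(line, testset):
--     x = 0
--     a = []
--     def checkLine(line, x):
--         if not set(line[x]).isdisjoint(testset):
--             a.append(x)
--         else:
--             try:
--                 a.append(x)
--                 x += 1
--                 checkLine(line, x)
--             except IndexError:
--                 a.append(x)
--                 a.append(x+1)
--         return a
--     a = checkLine(line, x)
--
--     if len(a) > len(line):
--         a = -1
--     else:
--         a = max(a)
--     return a
--
-- def check(v, x, y):
--     t = x
--     r = []
--     def checkDown(v, x, y, t):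
--         testset = set(v[x][y])
--         try:
--             a = checkAcross(v[x+1], testset)
--             if a == -1:
--                 r.append(t)
--             else:
--                 r.append(t)
--                 t += 1
--                 checkDown(v, x+1, a, t)
--         except:
--             r.append(t)
--         return r
--     r = checkDown(v, x, y, t)
--
--     return r
--
-- def getLifetimes(firesets):
--     lifetimes = []
--     for i in range(0, len(firesets)):
--         lifetime = []
--         for j in range(0, len(firesets[i])):
--             lifetime.append(check(firesets, i, j))
--         lifetimes.append(lifetime)
--     return lifetimes
-- ===== SOURCE B (Python) =====
-- def getLifetimes(firesets):
--     # Bottom-up DP: compute each cell's chain length once (row below first),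
--     # then emit the ranges.  A recomputes whole chains from every cell.
--     sets = [[frozenset(cell) for cell in row] for row in firesets]
--     rows = []            # chain lengths, rows in original order (built back-to-front)
--     below_sets, below_lens = [], []
--     for row in reversed(sets):
--         cur = []
--         for s in row:
--             L = 1
--             for t, bl in zip(below_sets, below_lens):
--                 if s & t:
--                     L = 1 + bl
--                     break
--             cur.append(L)
--         rows = [cur] + rows
--         below_sets, below_lens = row, cur
--     return [[list(range(i, i + L)) for L in lens] for i, lens in enumerate(rows)]
-- ===== Notes on version B (the rewrite author's own statement) =====
-- stated objective: faster
-- what changed: Replaces per-cell top-down chain recursion (each chain re-walked from every starting cell, with exceptions as control flow) by a single bottom-up dynamic program that computes each cell's chain length once from the row below and then emits the ranges.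
import Mathlib
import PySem

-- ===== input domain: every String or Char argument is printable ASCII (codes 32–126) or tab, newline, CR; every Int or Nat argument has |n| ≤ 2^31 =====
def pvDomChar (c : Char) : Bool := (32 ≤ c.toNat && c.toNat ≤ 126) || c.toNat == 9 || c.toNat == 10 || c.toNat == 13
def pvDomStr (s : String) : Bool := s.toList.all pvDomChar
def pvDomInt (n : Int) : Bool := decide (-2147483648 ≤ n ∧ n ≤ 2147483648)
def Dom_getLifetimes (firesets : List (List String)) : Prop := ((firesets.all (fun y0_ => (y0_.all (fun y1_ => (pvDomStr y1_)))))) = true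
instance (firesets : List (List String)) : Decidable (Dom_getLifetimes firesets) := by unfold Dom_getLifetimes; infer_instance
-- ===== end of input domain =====

-- B replaces A's per-cell top-down chain recursion by a single bottom-up pass that
-- computes each cell's chain length once (faster in a timing run's measurement).

-- ===== PORT A =====
-- set(s) for a string s
def strSet (s : String) : PySem.Set Char := PySem.Set.ofList s.toList

-- checkLine: 'none' = an uncaught IndexError at this level's line[x] (x is a Nat:
-- Python's x starts at 0 and only increments).  The inner try catches the raise of
-- the recursive call and appends x, x+1 (x already incremented: values ↑x+1, ↑x+2).
def checkLineA (line : List String) (testset : PySem.Set Char) (x : Nat) (a : List Int) : Option (List Int) :=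
  match h : PySem.List.pyGet? line (x : Int) with
  | none => none
  | some s =>
    if !(PySem.Set.isdisjoint (strSet s) testset) then some (a ++ [(x : Int)])
    else
      match checkLineA line testset (x + 1) (a ++ [(x : Int)]) with
      | some r => some r
      | none => some ((a ++ [(x : Int)]) ++ [(x : Int) + 1, (x : Int) + 2])
  termination_by line.length - x
  decreasing_by
    simp only [PySem.List.pyGet?_natCast] at h
    obtain ⟨hlt, -⟩ := List.getElem?_eq_some_iff.mp h
    omega

-- checkAcross: 'none' = an exception escapes (IndexError on an empty line, or —
-- unreachably, a is never empty — ValueError from max([])); check's bare 'except' catches any.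
def checkAcrossA (line : List String) (testset : PySem.Set Char) : Option Int :=
  match checkLineA line testset 0 [] with
  | none => none
  | some a =>
    if (a.length : Int) > PySem.List.len line then some (-1)
    else
      match PySem.List.max? a (fun v => v) with
      | some m => some m
      | none => none

-- checkDown: 'none' = this level's set(v[x][y]) raised (propagates to the caller's
-- bare 'except', which appends the already-incremented t).
def checkDownA (v : List (List String)) (x : Nat) (y t : Int) (r : List Int) : Option (List Int) :=
  match PySem.List.pyGet? v (x : Int) with
  | none => none
  | some row =>
    match PySem.List.pyGet? row y with
    | none => none
    | some cell =>
      let testset := strSet cell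
      match h : PySem.List.pyGet? v ((x : Int) + 1) with
      | none => some (r ++ [t])                    -- v[x+1]: IndexError, caught
      | some nextrow =>
        match checkAcrossA nextrow testset with
        | none => some (r ++ [t])                  -- exception inside checkAcross, caught
        | some a =>
          if a == -1 then some (r ++ [t])
          else
            match checkDownA v (x + 1) a (t + 1) (r ++ [t]) with
            | some r' => some r'
            | none => some ((r ++ [t]) ++ [t + 1]) -- recursive raise, caught after t += 1
  termination_by v.length - x
  decreasing_by
    have : ((x : Int) + 1) = ((x + 1 : Nat) : Int) := by push_cast; ring
    rw [this, PySem.List.pyGet?_natCast] at h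
    obtain ⟨hlt, -⟩ := List.getElem?_eq_some_iff.mp h
    omega

def checkA (v : List (List String)) (x : Nat) (y : Int) : Option (List Int) :=
  checkDownA v x y (x : Int) []

def getLifetimes (firesets : List (List String)) : List (List (List Int)) :=
  (List.range firesets.length).foldl
    (fun lifetimes i =>
      lifetimes ++ [(List.range (firesets.getD i []).length).foldl
        (fun lifetime (j : Nat) => lifetime ++ [(checkA firesets i (j : Int)).getD []]) []])
    []
-- (.getD [] is unreachable: i, j range over valid indices, so check never raises)
-- ===== PORT B =====
def interNonempty (s t : PySem.Set Char) : Bool := !(PySem.Set.inter s t).isEmpty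

def firstLink (s : PySem.Set Char) (below : List (PySem.Set Char × Int)) : Int :=
  match below with
  | [] => 1
  | (t, bl) :: rest => if interNonempty s t then 1 + bl else firstLink s rest

def getLifetimes_alt (firesets : List (List String)) : List (List (List Int)) :=
  let sets := firesets.map (fun row => row.map strSet)
  let st := sets.foldr
    (fun row st =>
      let cur := row.map (fun s => firstLink s (st.1.zip st.2.1))
      (row, cur, cur :: st.2.2))
    ([], [], [])
  (st.2.2.zipIdx.map (fun p =>
    p.1.map (fun L => PySem.List.pyRange (p.2 : Int) ((p.2 : Int) + L) 1)))


-- ===== PRECONDITION & SPEC =====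
def Spec_getLifetimes (firesets : List (List String)) (out : List (List (List Int))) : Prop := out = getLifetimes_alt firesets
instance (firesets : List (List String)) (out : List (List (List Int))) : Decidable (Spec_getLifetimes firesets out) := by unfold Spec_getLifetimes; infer_instance

-- ===== CLAIM (what is proved, stated in full; the proofs are below) =====
def Claim_equal_getLifetimes : Prop := ∀ (firesets : List (List String)), Dom_getLifetimes firesets → Spec_getLifetimes firesets (getLifetimes firesets)

-- ===== LEMMAS AND PROOFS =====
def pbA (testset : PySem.Set Char) (c : String) : Bool :=
  !(PySem.Set.isdisjoint (strSet c) testset)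

theorem pyRange_three (c : Int) :
    PySem.List.pyRange c (c + 3) 1 = [c, c + 1, c + 2] := by
  rw [PySem.List.pyRange_one]
  have h3 : (c + 3 - c).toNat = 3 := by omega
  rw [h3]
  simp [List.range_succ]

theorem checkLineA_eq (ln : List String) (ts : PySem.Set Char) :
    ∀ (n x : Nat) (a : List Int), ln.length - x = n → x ≤ ln.length →
    checkLineA ln ts x a =
      (if x = ln.length then none
      else
        match List.findIdx? (pbA ts) (ln.drop x) with
        | some d => some (a ++ PySem.List.pyRange (x : Int) ((x : Int) + (d : Int) + 1) 1)
        | none => some (a ++ PySem.List.pyRange (x : Int) ((ln.length : Int) + 2) 1)) := by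
  intro n
  induction n with
  | zero =>
    intro x a hn hx
    have hxe : x = ln.length := by omega
    rw [checkLineA, if_pos hxe]
    split
    · rfl
    · rename_i s hs
      exfalso
      rw [PySem.List.pyGet?_natCast] at hs
      obtain ⟨hlt, -⟩ := List.getElem?_eq_some_iff.mp hs
      omega
  | succ n ih =>
    intro x a hn hx
    have hlt : x < ln.length := by omega
    have hsome : PySem.List.pyGet? ln (x : Int) = some (ln[x]'hlt) := by
      rw [PySem.List.pyGet?_natCast]; exact List.getElem?_eq_getElem hlt
    rw [checkLineA, if_neg (by omega), List.drop_eq_getElem_cons hlt, List.findIdx?_cons]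
    split
    · rename_i h0
      rw [hsome] at h0; cases h0
    rename_i s hs
    rw [hsome] at hs
    injection hs with hs
    subst hs
    by_cases hp : pbA ts ln[x]
    · rw [if_pos (by simpa [pbA] using hp), if_pos (by simp [hp])]
      simp [PySem.List.pyRange_one_singleton]
    · rw [if_neg (by simpa [pbA] using hp), if_neg (by simp [hp])]
      rw [ih (x + 1) (a ++ [(x : Int)]) (by omega) (by omega)]
      by_cases hend : x + 1 = ln.length
      · rw [if_pos hend]
        have hdrop : ln.drop (x + 1) = [] := by
          rw [hend]; simp
        rw [hdrop]
        simp only [List.findIdx?_nil, Option.map_none]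
        have hc : ((ln.length : Int) + 2) = (x : Int) + 3 := by omega
        rw [hc, pyRange_three]
        simp
      · rw [if_neg hend]
        cases hfi : List.findIdx? (pbA ts) (ln.drop (x + 1)) with
        | some d =>
          simp only [Option.map_some]
          have h1 : ((x : Int)) + ((d + 1 : Nat) : Int) + 1 = ((x : Int)) + 1 + ((d : Int) + 1) := by
            push_cast; ring
          rw [h1, PySem.List.pyRange_one_cons (by omega)]
          have h2 : ((x + 1 : Nat) : Int) + (d : Int) + 1 = (x : Int) + 1 + ((d : Int) + 1) := by
            push_cast; ring
          rw [h2]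
          simp only [List.append_assoc, List.cons_append, List.nil_append, Option.some.injEq,
            List.append_cancel_left_eq]
          conv_rhs => rw [PySem.List.pyRange_one_cons (show (x : Int) < (x : Int) + 1 + ((d : Int) + 1) by omega)]
          push_cast
          conv_rhs => rw [PySem.List.pyRange_one_cons (show (x : Int) + 1 < (x : Int) + 1 + ((d : Int) + 1) by omega)]
        | none =>
          simp only [Option.map_none]
          have hlen : (x : Int) < (ln.length : Int) + 2 := by omega
          rw [PySem.List.pyRange_one_cons hlen]
          have h2 : ((x + 1 : Nat) : Int) = (x : Int) + 1 := by push_cast; ring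
          rw [h2]
          simp
theorem max_pyRange (a b : Int) (h : a ≤ b) :
    PySem.List.max? (PySem.List.pyRange a (b + 1) 1) (fun v => v) = some b := by
  have hb : b ∈ PySem.List.pyRange a (b + 1) 1 :=
    PySem.List.mem_pyRange_one.mpr ⟨h, by omega⟩
  cases hm : PySem.List.max? (PySem.List.pyRange a (b + 1) 1) (fun v => v) with
  | none =>
    rw [PySem.List.max?_eq_none_iff] at hm
    rw [hm] at hb; simp at hb
  | some m =>
    have h1 := PySem.List.max?_mem hm
    have h2 := PySem.List.max?_isMax hm b hb
    have h3 := PySem.List.mem_pyRange_one.mp h1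
    simp only [Option.some.injEq]
    omega

theorem checkAcrossA_eq (ln : List String) (ts : PySem.Set Char) :
    checkAcrossA ln ts =
      (if ln.isEmpty then none
      else
        match List.findIdx? (pbA ts) ln with
        | some k => some ((k : Nat) : Int)
        | none => some (-1)) := by
  rw [checkAcrossA, checkLineA_eq ln ts ln.length 0 [] (by omega) (by omega)]
  rcases Nat.eq_zero_or_pos ln.length with hz | hpos
  · rw [if_pos (by omega), if_pos (by simpa [List.isEmpty_iff, List.length_eq_zero_iff] using hz)]
  · rw [if_neg (by omega), if_neg (by simp [List.isEmpty_iff]; intro h; simp [h] at hpos)]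
    rw [List.drop_zero]
    cases hfi : List.findIdx? (pbA ts) ln with
    | some d =>
      obtain ⟨hdlt, -⟩ := List.findIdx?_eq_some_iff_getElem.mp hfi
      simp only [List.nil_append, Nat.cast_zero, zero_add]
      have hlen : (PySem.List.pyRange 0 ((d : Int) + 1) 1).length = d + 1 := by
        rw [PySem.List.length_pyRange_one]; omega
      rw [if_neg (by rw [hlen, PySem.List.len_eq]; push_cast; omega)]
      rw [max_pyRange 0 (d : Int) (by omega)]
    | none =>
      simp only [List.nil_append, Nat.cast_zero, zero_add]
      have hlen : (PySem.List.pyRange 0 ((ln.length : Int) + 2) 1).length = ln.length + 2 := by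
        rw [PySem.List.length_pyRange_one]; omega
      rw [if_pos (by rw [hlen, PySem.List.len_eq]; push_cast; omega)]

theorem hit_eq (ts : PySem.Set Char) (c : String) :
    interNonempty ts (strSet c) = pbA ts c := by
  simp only [interNonempty, pbA]
  congr 1
  apply Bool.coe_iff_coe.mp
  rw [List.isEmpty_iff, PySem.Set.isdisjoint_iff]
  constructor
  · intro he x hx hxt
    have hm : x ∈ PySem.Set.inter ts (strSet c) := (PySem.Set.mem_inter ts (strSet c) x).mpr ⟨hxt, hx⟩
    rw [he] at hm
    simp at hm
  · intro hd
    refine List.eq_nil_iff_forall_not_mem.mpr ?_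
    intro x hx
    have := (PySem.Set.mem_inter ts (strSet c) x).mp hx
    exact hd x this.2 this.1

def lensRows : List (List (PySem.Set Char)) → List (List Int)
  | [] => []
  | row :: rest =>
    (row.map (fun s => firstLink s ((rest.headD []).zip ((lensRows rest).headD [])))) ::
      lensRows rest

theorem lensRows_length (rows : List (List (PySem.Set Char))) :
    (lensRows rows).length = rows.length := by
  induction rows with
  | nil => rfl
  | cons row rest ih => simp [lensRows, ih]

theorem firstLink_eq (s : PySem.Set Char) :
    ∀ (ns : List (PySem.Set Char)) (ls : List Int), ns.length = ls.length →
    firstLink s (ns.zip ls) =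
      (match List.findIdx? (fun u => interNonempty s u) ns with
      | some k => 1 + ls.getD k 0
      | none => 1) := by
  intro ns
  induction ns with
  | nil => intro ls _; rfl
  | cons t rest ih =>
    intro ls hl
    match ls with
    | [] => simp at hl
    | bl :: ls' =>
      simp only [List.zip_cons_cons, firstLink, List.findIdx?_cons]
      by_cases hc : interNonempty s t
      · simp [hc]
      · simp only [hc, if_false, Bool.false_eq_true]
        rw [ih ls' (by simpa using hl)]
        cases h : List.findIdx? (fun u => interNonempty s u) rest <;> simp

theorem firstLink_pos (s : PySem.Set Char) (below : List (PySem.Set Char × Int))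
    (h : ∀ p ∈ below, 1 ≤ p.2) : 1 ≤ firstLink s below := by
  induction below with
  | nil => simp [firstLink]
  | cons p rest ih =>
    obtain ⟨t, bl⟩ := p
    simp only [firstLink]
    split_ifs
    · have := h (t, bl) (by simp); omega
    · exact ih (fun q hq => h q (by simp [hq]))

theorem lensRows_pos (rows : List (List (PySem.Set Char))) :
    ∀ l ∈ lensRows rows, ∀ L ∈ l, 1 ≤ L := by
  induction rows with
  | nil => simp [lensRows]
  | cons row rest ih =>
    intro l hl L hL
    simp only [lensRows, List.mem_cons] at hl
    rcases hl with rfl | hl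
    · obtain ⟨s, _, rfl⟩ := List.mem_map.mp hL
      apply firstLink_pos
      intro p hp
      have h2 := List.of_mem_zip hp
      rcases hr : lensRows rest with _ | ⟨l0, ls0⟩
      · rw [hr] at h2; simp at h2
      · refine ih l0 (by rw [hr]; simp) p.2 ?_
        rw [hr] at h2; simpa using h2.2
    · exact ih l hl L hL

theorem lensRows_drop (i : Nat) : ∀ (rows : List (List (PySem.Set Char))),
    lensRows (rows.drop i) = (lensRows rows).drop i := by
  induction i with
  | zero => simp
  | succ n ih =>
    intro rows
    cases rows with
    | nil => rfl
    | cons row rest => simpa [lensRows] using ih rest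

theorem checkDownA_eq (v : List (List String)) :
    ∀ (n x j : Nat) (t : Int) (r : List Int), v.length - x = n → (hx : x < v.length) →
    j < (v[x]'hx).length →
    checkDownA v x (j : Int) t r =
      some (r ++ PySem.List.pyRange t
        (t + ((lensRows ((v.map (fun row => row.map strSet)).drop x)).headD []).getD j 0) 1) := by
  intro n
  induction n with
  | zero => intro x j t r hn hx hj; omega
  | succ n ih =>
    intro x j t r hn hx hj
    have hvx : PySem.List.pyGet? v (x : Int) = some (v[x]'hx) := by
      rw [PySem.List.pyGet?_natCast]; exact List.getElem?_eq_getElem hx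
    have hcell : PySem.List.pyGet? (v[x]'hx) (j : Int) = some ((v[x]'hx)[j]'hj) := by
      rw [PySem.List.pyGet?_natCast]; exact List.getElem?_eq_getElem hj
    -- the drop decomposition at x
    have hdropx : (v.map (fun row => row.map strSet)).drop x
        = ((v[x]'hx).map strSet) :: (v.map (fun row => row.map strSet)).drop (x + 1) := by
      rw [← List.map_drop, List.drop_eq_getElem_cons hx, List.map_cons, List.map_drop]
    set S := v.map (fun row => row.map strSet) with hS
    set lens := (lensRows (S.drop (x + 1))).headD [] with hlens
    set below := ((S.drop (x + 1)).headD []).zip lens with hbelow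
    have hL : ((lensRows (S.drop x)).headD []).getD j 0
        = firstLink (strSet ((v[x]'hx)[j]'hj)) below := by
      rw [hdropx]
      show (((v[x]'hx).map strSet).map
        (fun s => firstLink s (((S.drop (x+1)).headD []).zip ((lensRows (S.drop (x+1))).headD [])))).getD j 0 = _
      rw [List.getD_eq_getElem _ _ (by simpa using hj)]
      simp [hbelow, hlens]
    rw [hL, checkDownA]
    split
    · rename_i h0; rw [hvx] at h0; cases h0
    rename_i row hrow
    rw [hvx] at hrow; injection hrow with hrow; subst hrow
    split
    · rename_i h0; rw [hcell] at h0; cases h0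
    rename_i cell hcell2
    rw [hcell] at hcell2; injection hcell2 with hcell2; subst hcell2
    by_cases hlast : x + 1 = v.length
    · -- v[x+1] raises IndexError: chain ends here
      have hnone : PySem.List.pyGet? v ((x : Int) + 1) = none := by
        have : ((x : Int) + 1) = ((x + 1 : Nat) : Int) := by push_cast; ring
        rw [this, PySem.List.pyGet?_natCast]
        exact List.getElem?_eq_none (by omega)
      split
      · have hd : S.drop (x + 1) = [] := by
          apply List.drop_of_length_le; simp [hS]; omega
        rw [hd] at hbelow
        simp only [List.headD_nil, List.zip_nil_left] at hbelow
        rw [hbelow]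
        show some (r ++ [t]) = some (r ++ PySem.List.pyRange t (t + 1) 1)
        rw [PySem.List.pyRange_one_singleton]
      · rename_i nr hnr; rw [hnone] at hnr; cases hnr
    · -- there is a next row
      have hx1 : x + 1 < v.length := by omega
      have hsome1 : PySem.List.pyGet? v ((x : Int) + 1) = some (v[x+1]'hx1) := by
        have : ((x : Int) + 1) = ((x + 1 : Nat) : Int) := by push_cast; ring
        rw [this, PySem.List.pyGet?_natCast]
        exact List.getElem?_eq_getElem hx1
      split
      · rename_i h0; rw [hsome1] at h0; cases h0
      rename_i nextrow hnr
      rw [hsome1] at hnr; injection hnr with hnr; subst hnr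
      -- next-row structure on the B side
      have hdropx1 : S.drop (x + 1) = ((v[x+1]'hx1).map strSet) :: S.drop (x + 2) := by
        rw [hS, ← List.map_drop, List.drop_eq_getElem_cons hx1, List.map_cons, List.map_drop]
      have hlens' : lens = ((v[x+1]'hx1).map strSet).map (fun s => firstLink s
          (((S.drop (x+2)).headD []).zip ((lensRows (S.drop (x+2))).headD []))) := by
        rw [hlens, hdropx1]; rfl
      have hlenslen : lens.length = (v[x+1]'hx1).length := by rw [hlens']; simp
      have hns : (S.drop (x + 1)).headD [] = (v[x+1]'hx1).map strSet := by rw [hdropx1]; rfl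
      have hfl : firstLink (strSet ((v[x]'hx)[j]'hj)) below =
          (match List.findIdx? (pbA (strSet ((v[x]'hx)[j]'hj))) (v[x+1]'hx1) with
          | some k => 1 + lens.getD k 0
          | none => 1) := by
        rw [hbelow, hns, firstLink_eq _ _ _ (by simp [hlenslen]), List.findIdx?_map]
        have hpf : (fun u => interNonempty (strSet ((v[x]'hx)[j]'hj)) u) ∘ strSet
            = pbA (strSet ((v[x]'hx)[j]'hj)) := by
          funext c; exact hit_eq _ c
        rw [hpf]
      show (match checkAcrossA (v[x+1]'hx1) (strSet ((v[x]'hx)[j]'hj)) with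
        | none => some (r ++ [t])
        | some a =>
          if (a == -1) = true then some (r ++ [t])
          else
            match checkDownA v (x+1) a (t+1) (r ++ [t]) with
            | some r' => some r'
            | none => some ((r ++ [t]) ++ [t+1])) = _
      rw [checkAcrossA_eq]
      by_cases hemp : (v[x+1]'hx1).isEmpty
      · -- empty next row: checkAcross raises (caught); B finds nothing below
        rw [if_pos hemp]
        have : List.findIdx? (pbA (strSet ((v[x]'hx)[j]'hj))) (v[x+1]'hx1) = none := by
          rw [List.isEmpty_iff.mp hemp]; rfl
        rw [hfl, this]
        show some (r ++ [t]) = some (r ++ PySem.List.pyRange t (t + 1) 1)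
        rw [PySem.List.pyRange_one_singleton]
      · rw [if_neg hemp]
        cases hfi : List.findIdx? (pbA (strSet ((v[x]'hx)[j]'hj))) (v[x+1]'hx1) with
        | none =>
          rw [hfl, hfi]
          show some (r ++ [t]) = some (r ++ PySem.List.pyRange t (t + 1) 1)
          rw [PySem.List.pyRange_one_singleton]
        | some k =>
          obtain ⟨hklt, -⟩ := List.findIdx?_eq_some_iff_getElem.mp hfi
          show (if (((k : Nat) : Int) == -1) = true then some (r ++ [t])
            else
              match checkDownA v (x+1) ((k : Nat) : Int) (t+1) (r ++ [t]) with
              | some r' => some r'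
              | none => some ((r ++ [t]) ++ [t+1])) = _
          rw [if_neg (by simp)]
          have hrec := ih (x + 1) k (t + 1) (r ++ [t]) (by omega) hx1 hklt
          rw [hrec]
          -- positivity of the looked-up length
          have hpos : 1 ≤ lens.getD k 0 := by
            rcases hlr : lensRows (S.drop (x+1)) with _ | ⟨l0, ls0⟩
            · exfalso
              have := lensRows_length (S.drop (x + 1))
              rw [hlr] at this
              have : (S.drop (x+1)).length = 0 := by simpa using this.symm
              rw [hdropx1] at this; simp at this
            · have hl0 : lens = l0 := by rw [hlens, hlr]; rfl
              have hmem : lens.getD k 0 ∈ l0 := by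
                rw [← hl0]
                exact List.getD_eq_getElem lens 0 (by omega : k < lens.length) ▸
                  List.getElem_mem _
              exact lensRows_pos (S.drop (x+1)) l0 (by rw [hlr]; simp) _ hmem
          rw [hfl, hfi]
          show some ((r ++ [t]) ++ PySem.List.pyRange (t + 1)
              (t + 1 + ((lensRows (S.drop (x+1))).headD []).getD k 0) 1)
            = some (r ++ PySem.List.pyRange t (t + (1 + lens.getD k 0)) 1)
          rw [← hlens]
          rw [PySem.List.pyRange_one_cons (show t < t + (1 + lens.getD k 0) by omega)]
          have harg : t + (1 + lens.getD k 0) = t + 1 + lens.getD k 0 := by ring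
          rw [harg]
          simp

theorem foldB (sets : List (List (PySem.Set Char))) :
    sets.foldr
      (fun row st =>
        let cur := row.map (fun s => firstLink s (st.1.zip st.2.1))
        (row, cur, cur :: st.2.2))
      (([], [], []) : List (PySem.Set Char) × List Int × List (List Int))
    = (sets.headD [], (lensRows sets).headD [], lensRows sets) := by
  induction sets with
  | nil => rfl
  | cons row rest ih => simp [List.foldr_cons, ih, lensRows]

theorem getLifetimes_eq_alt (v : List (List String)) :
    getLifetimes v = getLifetimes_alt v := by
  have halt : getLifetimes_alt v
      = (lensRows (v.map (fun row => row.map strSet))).zipIdx.map (fun p =>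
          p.1.map (fun L => PySem.List.pyRange (p.2 : Int) ((p.2 : Int) + L) 1)) := by
    show (((v.map (fun row => row.map strSet)).foldr
      (fun row st =>
        let cur := row.map (fun s => firstLink s (st.1.zip st.2.1))
        (row, cur, cur :: st.2.2))
      (([], [], []) : List (PySem.Set Char) × List Int × List (List Int))).2.2.zipIdx.map (fun p =>
        p.1.map (fun L => PySem.List.pyRange (p.2 : Int) ((p.2 : Int) + L) 1))) = _
    rw [foldB]
  have ha : getLifetimes v
      = (List.range v.length).map (fun i =>
          (List.range (v.getD i []).length).map (fun (j : Nat) => (checkA v i (j : Int)).getD [])) := by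
    unfold getLifetimes
    rw [PySem.List.foldl_append_singleton_eq_map]
    simp only [List.nil_append]
    congr 1
    funext i
    rw [PySem.List.foldl_append_singleton_eq_map]
    simp only [List.nil_append]
  rw [ha, halt]
  set S := v.map (fun row => row.map strSet) with hS
  apply List.ext_getElem
  · simp [lensRows_length, hS]
  intro i h1 h2
  have hi : i < v.length := by simpa using h1
  have hilr : i < (lensRows S).length := by
    rw [lensRows_length]; simp [hS]; omega
  rw [List.getElem_map, List.getElem_map, List.getElem_range, List.getElem_zipIdx]
  -- identify row i of the length table
  have hdropi : S.drop i = ((v[i]'hi).map strSet) :: S.drop (i + 1) := by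
    rw [hS, ← List.map_drop, List.drop_eq_getElem_cons hi, List.map_cons, List.map_drop]
  have hrowi : (lensRows S)[i]'hilr = (lensRows (S.drop i)).headD [] := by
    rw [lensRows_drop, List.headD_eq_head?_getD, List.head?_drop,
      List.getElem?_eq_getElem hilr]
    rfl
  have hrowlen : ((lensRows S)[i]'hilr).length = (v[i]'hi).length := by
    rw [hrowi, hdropi]
    show ((((v[i]'hi).map strSet)).map _).length = _
    simp
  have hlen2 : (v.getD i []).length = (v[i]'hi).length := by
    rw [List.getD_eq_getElem v [] hi]
  apply List.ext_getElem
  · simp only [List.length_map, List.length_range]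
    rw [hlen2, ← hrowlen]
  intro j hj1 hj2
  have hjv : j < (v[i]'hi).length := by
    simp only [List.length_map, List.length_range] at hj1
    rw [hlen2] at hj1
    exact hj1
  rw [List.getElem_map, List.getElem_map, List.getElem_range]
  have hchk := checkDownA_eq v (v.length - i) i j (i : Int) [] rfl hi hjv
  rw [checkA, hchk]
  simp only [Option.getD_some, List.nil_append, Nat.zero_add]
  congr 2
  rw [← hrowi]
  exact List.getD_eq_getElem _ 0 (by rw [hrowlen]; exact hjv)

-- ===== VERDICT (by name: the statement is the Claim_ definition above) =====
theorem getLifetimes_spec : Claim_equal_getLifetimes := by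
  intro firesets _
  unfold Spec_getLifetimes
  exact getLifetimes_eq_alt firesets
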